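-- pv_equiv track=rewrite | github.com/Chencheng78/python-learning | jumpgame2.py | longestjump
-- ===== SOURCE A (Python) =====
-- def longestjump(seq):
-- 	l = 0
-- 	for i in range(1,len(seq)):
-- 		if seq[i]>=i and seq[i]>=l:
-- 			l = i
-- 	if len(seq) -1 == l: return []
-- 	else:
-- 		return seq[l:]
-- ===== SOURCE B (Python) =====
-- def longestjump(seq):
--     l = 0
--     for i in range(len(seq) - 1, 0, -1):
--         if seq[i] >= i:
--             l = i
--             break
--     return [] if len(seq) - 1 == l else seq[l:]
-- ===== Notes on version B (the rewrite author's own statement) =====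
-- stated objective: simpler
-- what changed: A's second comparison seq[i]>=l is redundant, so B replaces A's full forward fold with a backward scan that breaks at the first index i>=1 with seq[i]>=i (defaulting to 0).
import Mathlib
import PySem

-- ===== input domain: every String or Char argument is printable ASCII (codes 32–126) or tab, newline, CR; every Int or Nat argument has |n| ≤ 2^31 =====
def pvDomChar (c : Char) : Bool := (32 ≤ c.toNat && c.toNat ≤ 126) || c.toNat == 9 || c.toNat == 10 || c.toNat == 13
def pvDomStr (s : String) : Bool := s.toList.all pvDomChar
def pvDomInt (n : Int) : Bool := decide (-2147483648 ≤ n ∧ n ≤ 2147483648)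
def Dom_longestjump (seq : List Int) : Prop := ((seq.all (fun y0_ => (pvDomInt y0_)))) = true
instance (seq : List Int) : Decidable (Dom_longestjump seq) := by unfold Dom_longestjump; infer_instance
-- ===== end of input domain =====

-- B scans indices backwards and stops at the first i with seq[i] >= i (A's second test seq[i] >= l is redundant); objective: simpler.

-- ===== PORT A =====
-- forward loop: l = 0; for i in range(1, len(seq)): if seq[i] >= i and seq[i] >= l: l = i
def longestjump (seq : List Int) : List Int :=
  let n : Int := PySem.List.len seq
  let l : Int := (PySem.List.pyRange 1 n 1).foldl
    (fun l i => if PySem.List.pyGetD seq i 0 ≥ i ∧ PySem.List.pyGetD seq i 0 ≥ l then i else l) 0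
  if n - 1 = l then [] else PySem.List.slice seq (some l) none

-- ===== PORT B =====
-- backward scan with break: first i (descending) with seq[i] >= i, else 0
def longestjumpAltFind (seq : List Int) : List Int → Int
  | [] => 0
  | i :: rest => if PySem.List.pyGetD seq i 0 ≥ i then i else longestjumpAltFind seq rest

def longestjump_alt (seq : List Int) : List Int :=
  let n : Int := PySem.List.len seq
  let l : Int := longestjumpAltFind seq (PySem.List.pyRange (n - 1) 0 (-1))
  if n - 1 = l then [] else PySem.List.slice seq (some l) none

-- ===== PRECONDITION & SPEC =====
def Spec_longestjump (seq : List Int) (out : List Int) : Prop := out = longestjump_alt seq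
instance (seq : List Int) (out : List Int) : Decidable (Spec_longestjump seq out) := by unfold Spec_longestjump; infer_instance

-- ===== CLAIM (what is proved, stated in full; the proofs are below) =====
def Claim_equal_longestjump : Prop := ∀ (seq : List Int), Dom_longestjump seq → Spec_longestjump seq (longestjump seq)

-- ===== LEMMAS AND PROOFS =====

-- On a strictly increasing list of indices all above the accumulator, A's second test is redundant.
lemma foldl_drop_second_test (f : Int → Int) :
    ∀ (xs : List Int) (a : Int), (∀ i ∈ xs, a < i) → xs.Pairwise (· < ·) →
      xs.foldl (fun l i => if f i ≥ i ∧ f i ≥ l then i else l) a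
        = xs.foldl (fun l i => if f i ≥ i then i else l) a := by
  intro xs
  induction xs with
  | nil => intro a _ _; rfl
  | cons i rest ih =>
    intro a hmem hpw
    have hai : a < i := hmem i (by simp)
    rw [List.pairwise_cons] at hpw
    by_cases h : f i ≥ i
    · have h2 : f i ≥ a := by omega
      simp only [List.foldl_cons, if_pos (And.intro h h2), if_pos h]
      exact ih i (fun j hj => hpw.1 j hj) hpw.2
    · simp only [List.foldl_cons, if_neg (by tauto : ¬(f i ≥ i ∧ f i ≥ a)), if_neg h]
      exact ih a (fun j hj => hmem j (by simp [hj])) hpw.2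

-- Folding the simple update over the reverse of a list is the first hit of the list.
lemma foldl_reverse_eq_altFind (seq : List Int) :
    ∀ (ys : List Int),
      ys.reverse.foldl (fun l i => if PySem.List.pyGetD seq i 0 ≥ i then i else l) 0
        = longestjumpAltFind seq ys := by
  intro ys
  induction ys with
  | nil => rfl
  | cons i rest ih =>
    simp only [List.reverse_cons, List.foldl_append, List.foldl_cons, List.foldl_nil,
      longestjumpAltFind, ih]

theorem longestjump_spec : Claim_equal_longestjump := by
  intro seq _
  unfold Spec_longestjump longestjump longestjump_alt
  simp only []
  have hrev : PySem.List.pyRange ((PySem.List.len seq) - 1) 0 (-1)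
      = (PySem.List.pyRange 1 (PySem.List.len seq) 1).reverse := by
    rw [PySem.List.pyRange_neg_one_eq_reverse]
    norm_num
  have hl : (PySem.List.pyRange 1 (PySem.List.len seq) 1).foldl
      (fun l i => if PySem.List.pyGetD seq i 0 ≥ i ∧ PySem.List.pyGetD seq i 0 ≥ l then i else l) 0
      = longestjumpAltFind seq (PySem.List.pyRange ((PySem.List.len seq) - 1) 0 (-1)) := by
    rw [foldl_drop_second_test (fun i => PySem.List.pyGetD seq i 0) _ 0
      (fun i hi => by have := (PySem.List.mem_pyRange_one).1 hi; omega)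
      (PySem.List.pairwise_lt_pyRange_one 1 (PySem.List.len seq))]
    rw [hrev, ← foldl_reverse_eq_altFind seq, List.reverse_reverse]
  rw [hl]
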